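-- pv_equiv track=rewrite | github.com/ravagerrz/cs101-ITC-s18A | assignments/A3/assignment70/a04.py | uniqueEntries
-- ===== SOURCE A (Python) =====
-- def uniqueEntries (n):
--     lst1 = []
--     lst2=[]
--     for i in n:
--         if i not in lst1:
--             lst1.append(i)
--         else:
--             lst2.append(i)
--     return lst1 ,lst2
-- ===== SOURCE B (Python) =====
-- def uniqueEntries(n):
--     data = list(n)
--     first = {}
--     for k, x in enumerate(data):
--         first.setdefault(x, k)
--     lst1 = [x for k, x in enumerate(data) if first[x] == k]
--     lst2 = [x for k, x in enumerate(data) if first[x] != k]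
--     return lst1, lst2
-- ===== Notes on version B (the rewrite author's own statement) =====
-- stated objective: faster
-- what changed: Instead of A's single stateful loop accumulating lst1 and testing quadratic membership in it, B first builds a map from value to its first-occurrence index in one pass, then classifies every position k declaratively by whether first[x] == k.
import Mathlib
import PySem

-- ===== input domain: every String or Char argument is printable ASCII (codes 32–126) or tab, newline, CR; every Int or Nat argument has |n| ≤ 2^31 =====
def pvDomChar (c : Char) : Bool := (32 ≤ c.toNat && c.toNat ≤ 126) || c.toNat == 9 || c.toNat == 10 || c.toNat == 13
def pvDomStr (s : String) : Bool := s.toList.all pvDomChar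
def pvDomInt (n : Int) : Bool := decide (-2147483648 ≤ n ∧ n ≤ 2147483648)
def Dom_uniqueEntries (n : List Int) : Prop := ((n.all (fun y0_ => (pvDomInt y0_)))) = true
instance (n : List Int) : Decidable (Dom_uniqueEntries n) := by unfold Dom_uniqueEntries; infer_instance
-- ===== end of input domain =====

-- B builds a first-occurrence-index map once, then classifies each position k by
-- first[x] == k, replacing A's stateful loop with quadratic membership tests.

-- ===== PORT A =====
def uniqueEntries (n : List Int) : List Int × List Int :=
  n.foldl (fun s i => if ¬ (i ∈ s.1) then (s.1 ++ [i], s.2) else (s.1, s.2 ++ [i])) ([], [])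

-- ===== PORT B =====
-- first.setdefault(x, k) ported via Dict.setdefault; first[x] == k is get? = some k
-- (the key is always present, so Python's d[x] lookup never raises)
def uniqueEntries_alt (n : List Int) : List Int × List Int :=
  let data := n
  let first := (PySem.List.enumerate data 0).foldl (fun d p => d.setdefault p.2 p.1)
    (PySem.Dict.empty : PySem.Dict Int Int)
  (((PySem.List.enumerate data 0).filter (fun p => decide (first.get? p.2 = some p.1))).map (fun p => p.2),
   ((PySem.List.enumerate data 0).filter (fun p => decide (¬ first.get? p.2 = some p.1))).map (fun p => p.2))

-- ===== PRECONDITION & SPEC =====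
def Spec_uniqueEntries (n : List Int) (out : List Int × List Int) : Prop := out = uniqueEntries_alt n
instance (n : List Int) (out : List Int × List Int) : Decidable (Spec_uniqueEntries n out) := by unfold Spec_uniqueEntries; infer_instance

-- ===== CLAIM (what is proved, stated in full; the proofs are below) =====
def Claim_equal_uniqueEntries : Prop := ∀ (n : List Int), Dom_uniqueEntries n → Spec_uniqueEntries n (uniqueEntries n)

-- ===== LEMMAS AND PROOFS =====

theorem pvSetdefault_of_contains {d : PySem.Dict Int Int} {x : Int} (v : Int)
    (hc : d.contains x = true) : d.setdefault x v = d := by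
  rw [PySem.Dict.setdefault, hc]; simp

theorem pvSetdefault_of_not_contains {d : PySem.Dict Int Int} {x : Int} (v : Int)
    (hc : d.contains x = false) : d.setdefault x v = d.insert x v := by
  rw [PySem.Dict.setdefault, hc]
  simp only [Bool.false_eq_true, if_false]
  apply PySem.Dict.ext
  rw [PySem.Dict.items_insert_of_not_contains (h := hc)]

theorem pvF_get? (l : List Int) (y : Int) :
    (((PySem.List.enumerate l 0).foldl (fun d p => d.setdefault p.2 p.1)
        (PySem.Dict.empty : PySem.Dict Int Int)).get? y)
      = (PySem.List.index? l y).map (fun j => (j : Int)) := by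
  induction l using List.reverseRecOn generalizing y with
  | nil => simp [PySem.List.enumerate_nil, PySem.List.index?_eq_idxOf?, PySem.Dict.get?_empty]
  | append_singleton l x ih =>
    rw [PySem.List.enumerate_append, List.foldl_append]
    simp only [PySem.List.enumerate_cons, PySem.List.enumerate_nil, List.foldl_cons,
      List.foldl_nil, zero_add]
    by_cases hx : x ∈ l
    · obtain ⟨j, hj⟩ : ∃ j, PySem.List.index? l x = some j := by
        rw [← Option.isSome_iff_exists, PySem.List.index?_isSome_iff]
        exact hx
      have hc : ((PySem.List.enumerate l 0).foldl (fun d p => d.setdefault p.2 p.1)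
          (PySem.Dict.empty : PySem.Dict Int Int)).contains x = true := by
        rw [PySem.Dict.contains_eq_isSome_get?, ih x, hj]
        rfl
      rw [pvSetdefault_of_contains _ hc, ih y]
      by_cases hy : y ∈ l
      · rw [PySem.List.index?_append_of_mem _ hy]
      · have h2 : y ∉ l ++ [x] := by
          intro h
          rcases List.mem_append.mp h with h | h
          · exact hy h
          · exact hy (by simpa [List.mem_singleton.mp h] using hx)
        rw [(PySem.List.index?_eq_none_iff _ _).mpr hy,
            (PySem.List.index?_eq_none_iff _ _).mpr h2]
    · have hc : ((PySem.List.enumerate l 0).foldl (fun d p => d.setdefault p.2 p.1)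
          (PySem.Dict.empty : PySem.Dict Int Int)).contains x = false := by
        rw [PySem.Dict.contains_eq_isSome_get?, ih x,
            (PySem.List.index?_eq_none_iff _ _).mpr hx]
        rfl
      rw [pvSetdefault_of_not_contains _ hc]
      by_cases hyx : y = x
      · subst hyx
        rw [PySem.Dict.get?_insert_self, PySem.List.index?_append_singleton_self (h := hx)]
        rfl
      · rw [PySem.Dict.get?_insert_of_ne (hne := hyx), ih y]
        by_cases hy : y ∈ l
        · rw [PySem.List.index?_append_of_mem _ hy]
        · have h2 : y ∉ l ++ [x] := by
            intro h
            rcases List.mem_append.mp h with h | h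
            · exact hy h
            · exact hyx (List.mem_singleton.mp h)
          rw [(PySem.List.index?_eq_none_iff _ _).mpr hy,
              (PySem.List.index?_eq_none_iff _ _).mpr h2]

theorem pvAlt_snoc (l : List Int) (x : Int) :
    uniqueEntries_alt (l ++ [x]) =
      (if x ∈ l then ((uniqueEntries_alt l).1, (uniqueEntries_alt l).2 ++ [x])
       else ((uniqueEntries_alt l).1 ++ [x], (uniqueEntries_alt l).2)) := by
  have hsnoc : ((PySem.List.enumerate (l ++ [x]) 0).foldl (fun d q => d.setdefault q.2 q.1)
      (PySem.Dict.empty : PySem.Dict Int Int))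
      = (((PySem.List.enumerate l 0).foldl (fun d q => d.setdefault q.2 q.1)
      (PySem.Dict.empty : PySem.Dict Int Int)).setdefault x ((l.length : Int))) := by
    rw [PySem.List.enumerate_append, List.foldl_append]
    simp [PySem.List.enumerate_cons]
  have hsnoc' : (List.foldl (fun d q => d.setdefault q.2 q.1)
      (PySem.Dict.empty : PySem.Dict Int Int)
      (PySem.List.enumerate l 0 ++ [(((l.length : Int)), x)]))
      = (((PySem.List.enumerate l 0).foldl (fun d q => d.setdefault q.2 q.1)
      (PySem.Dict.empty : PySem.Dict Int Int)).setdefault x ((l.length : Int))) := by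
    rw [List.foldl_append]
    simp
  have hcong : ∀ p ∈ PySem.List.enumerate l 0,
      (decide (((((PySem.List.enumerate l 0).foldl (fun d q => d.setdefault q.2 q.1)
          (PySem.Dict.empty : PySem.Dict Int Int)).setdefault x ((l.length : Int))).get? p.2) = some p.1))
        = (decide ((((PySem.List.enumerate l 0).foldl (fun d q => d.setdefault q.2 q.1)
          (PySem.Dict.empty : PySem.Dict Int Int)).get? p.2) = some p.1)) := by
    intro p hp
    obtain ⟨k, hk, rfl⟩ := (PySem.List.mem_enumerate_iff l 0 p).mp hp
    simp only [zero_add]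
    rw [← hsnoc, pvF_get?, pvF_get?, PySem.List.index?_append_of_mem _ (List.getElem_mem hk)]
  have hcong' : ∀ p ∈ PySem.List.enumerate l 0,
      (decide (¬ ((((PySem.List.enumerate l 0).foldl (fun d q => d.setdefault q.2 q.1)
          (PySem.Dict.empty : PySem.Dict Int Int)).setdefault x ((l.length : Int))).get? p.2) = some p.1))
        = (decide (¬ (((PySem.List.enumerate l 0).foldl (fun d q => d.setdefault q.2 q.1)
          (PySem.Dict.empty : PySem.Dict Int Int)).get? p.2) = some p.1)) := by
    intro p hp
    simp only [decide_not, hcong p hp]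
  have hlast := pvF_get? (l ++ [x]) x
  rw [hsnoc] at hlast
  by_cases hm : x ∈ l
  · obtain ⟨j, hj⟩ : ∃ j, PySem.List.index? l x = some j := by
      rw [← Option.isSome_iff_exists, PySem.List.index?_isSome_iff]
      exact hm
    obtain ⟨hjlt, hxj, hmin⟩ := PySem.List.getElem_of_index?_eq_some (h := hj)
    rw [PySem.List.index?_append_of_mem _ hm, hj] at hlast
    have hne : ¬ (((j : Int)) = ((l.length : Int))) := by
      exact_mod_cast Nat.ne_of_lt hjlt
    simp only [uniqueEntries_alt, PySem.List.enumerate_append, zero_add, List.filter_append,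
      List.map_append, hsnoc', PySem.List.enumerate_cons, PySem.List.enumerate_nil]
    rw [List.filter_congr hcong, List.filter_congr hcong']
    simp [hlast, hm, hne]
  · rw [PySem.List.index?_append_singleton_self (h := hm)] at hlast
    simp only [uniqueEntries_alt, PySem.List.enumerate_append, zero_add, List.filter_append,
      List.map_append, hsnoc', PySem.List.enumerate_cons, PySem.List.enumerate_nil]
    rw [List.filter_congr hcong, List.filter_congr hcong']
    simp [hlast, hm]

theorem pvMain (l : List Int) :
    uniqueEntries l = uniqueEntries_alt l ∧
      ∀ x : Int, x ∈ (uniqueEntries l).1 ↔ x ∈ l := by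
  induction l using List.reverseRecOn with
  | nil => exact ⟨rfl, by simp [uniqueEntries]⟩
  | append_singleton l x ih =>
    obtain ⟨ihEq, ihMem⟩ := ih
    have hA : uniqueEntries (l ++ [x]) =
        (if ¬ (x ∈ (uniqueEntries l).1)
         then ((uniqueEntries l).1 ++ [x], (uniqueEntries l).2)
         else ((uniqueEntries l).1, (uniqueEntries l).2 ++ [x])) := by
      simp [uniqueEntries, List.foldl_append]
    rw [pvAlt_snoc, hA, ← ihEq]
    by_cases hm : x ∈ l
    · rw [if_neg (by simp [ihMem x, hm]), if_pos hm]
      refine ⟨rfl, fun y => ?_⟩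
      rw [ihMem y]
      simp only [List.mem_append, List.mem_singleton]
      constructor
      · exact Or.inl
      · rintro (h | rfl)
        · exact h
        · exact hm
    · rw [if_pos (by simp [ihMem x, hm]), if_neg hm]
      refine ⟨rfl, fun y => ?_⟩
      simp [ihMem y]

-- ===== VERDICT (by name: the statement is the Claim_ definition above) =====
theorem uniqueEntries_spec : Claim_equal_uniqueEntries := by
  intro n _
  exact (pvMain n).1
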